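-- pv_equiv track=rewrite | github.com/farobaba/faro-signals-bot | gold_signal_bot_fixed.py | sort_symbols_by_trend
-- ===== SOURCE A (Python) =====
-- def sort_symbols_by_trend(symbols: dict) -> list:
--     """
--     Return symbol keys in standard order.
--     No API calls here — avoids burning rate limit before the actual scan.
--     Major pairs (EUR, GBP, USD) go first as they tend to be most active.
--     """
--     priority = ["EUR/USD", "GBP/USD", "USD/JPY", "AUD/USD", "USD/CAD",
--                 "EUR/USD-OTC", "GBP/USD-OTC", "USD/JPY-OTC", "AUD/USD-OTC"]
--     result = []
--     # Prioritised pairs first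
--     for key in priority:
--         if key in symbols:
--             result.append(key)
--     # Rest in original order
--     for key in symbols:
--         if key not in result:
--             result.append(key)
--     return result
-- ===== SOURCE B (Python) =====
-- def sort_symbols_by_trend(symbols: dict) -> list:
--     """
--     Return symbol keys in standard order: priority pairs first, rest in
--     original dict order.  One stable sort over a rank table instead of
--     two filter passes.
--     """
--     priority = ["EUR/USD", "GBP/USD", "USD/JPY", "AUD/USD", "USD/CAD",
--                 "EUR/USD-OTC", "GBP/USD-OTC", "USD/JPY-OTC", "AUD/USD-OTC"]
--     rank = {k: i for i, k in enumerate(priority)}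
--     default = len(priority)
--     return sorted(symbols, key=lambda k: rank.get(k, default))
-- ===== Notes on version B (the rewrite author's own statement) =====
-- stated objective: faster
-- what changed: Replaces the two filter passes (priority scan with membership test, then a dict scan with an O(result) 'not in result' check) by a precomputed rank table and a single stable sort keyed on it.
import Mathlib
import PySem

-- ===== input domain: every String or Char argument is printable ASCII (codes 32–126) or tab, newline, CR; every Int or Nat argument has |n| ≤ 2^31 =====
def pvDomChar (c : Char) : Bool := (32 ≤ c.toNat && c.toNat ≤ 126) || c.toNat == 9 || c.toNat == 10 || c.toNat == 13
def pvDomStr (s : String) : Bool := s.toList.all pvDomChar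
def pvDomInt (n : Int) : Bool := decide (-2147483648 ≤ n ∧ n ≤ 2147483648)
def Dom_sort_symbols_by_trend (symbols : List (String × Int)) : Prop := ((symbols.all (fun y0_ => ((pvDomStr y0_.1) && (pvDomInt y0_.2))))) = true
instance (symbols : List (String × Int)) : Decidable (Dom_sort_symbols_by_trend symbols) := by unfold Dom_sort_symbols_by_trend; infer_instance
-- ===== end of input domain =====

-- B replaces A's two filter passes (quadratic via the 'key not in result' scan) by a precomputed rank table and one stable sort keyed on it (measured faster).
-- The dict argument is modelled as an association list; dict iteration = first occurrences of the keys, in order.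

-- ===== PORT A =====
-- the literal `priority` list both Python versions contain
def pvPriority : List String :=
  ["EUR/USD", "GBP/USD", "USD/JPY", "AUD/USD", "USD/CAD",
   "EUR/USD-OTC", "GBP/USD-OTC", "USD/JPY-OTC", "AUD/USD-OTC"]

def sort_symbols_by_trend (symbols : List (String × Int)) : List String :=
  let priority := pvPriority
  -- `key in symbols`: membership among the dict's keys
  let keys := symbols.map Prod.fst
  -- Prioritised pairs first
  let result := priority.foldl (fun acc key => if keys.contains key then acc ++ [key] else acc) []
  -- Rest in original order ('for key in symbols' iterates the dict's keys: first occurrences, in order)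
  let result := (PySem.List.dedup keys).foldl
      (fun acc key => if acc.contains key then acc else acc ++ [key]) result
  result

-- ===== PORT B =====
-- rank = {k: i for i, k in enumerate(priority)}
def pvRank : PySem.Dict String Int :=
  (PySem.List.enumerate pvPriority).foldl (fun d p => d.insert p.2 p.1) PySem.Dict.empty

def sort_symbols_by_trend_alt (symbols : List (String × Int)) : List String :=
  let rank := pvRank
  let dflt := PySem.List.len pvPriority
  -- sorted(symbols, key=…): stable sort over the dict's keys (first occurrences, in order)
  PySem.List.sorted (PySem.List.dedup (symbols.map Prod.fst)) (fun k => rank.getD k dflt) false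

-- ===== PRECONDITION & SPEC =====
def Spec_sort_symbols_by_trend (symbols : List (String × Int)) (out : List String) : Prop := out = sort_symbols_by_trend_alt symbols
instance (symbols : List (String × Int)) (out : List String) : Decidable (Spec_sort_symbols_by_trend symbols out) := by unfold Spec_sort_symbols_by_trend; infer_instance

-- ===== CLAIM (what is proved, stated in full; the proofs are below) =====
def Claim_equal_sort_symbols_by_trend : Prop := ∀ (symbols : List (String × Int)), Dom_sort_symbols_by_trend symbols → Spec_sort_symbols_by_trend symbols (sort_symbols_by_trend symbols)

-- ===== LEMMAS AND PROOFS =====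

-- B's sort key, named for the proofs (definitionally the key function of the B port)
def pvKey (k : String) : Int := pvRank.getD k (PySem.List.len pvPriority)

theorem pvRank_items : pvRank.items =
    [("EUR/USD", (0:Int)), ("GBP/USD", 1), ("USD/JPY", 2), ("AUD/USD", 3), ("USD/CAD", 4),
     ("EUR/USD-OTC", 5), ("GBP/USD-OTC", 6), ("USD/JPY-OTC", 7), ("AUD/USD-OTC", 8)] := by
  decide

theorem pvKey_of_not_mem (k : String) (h : k ∉ pvPriority) : pvKey k = 9 := by
  have hf : pvRank.items.find? (fun p => p.1 == k) = none := by
    rw [List.find?_eq_none]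
    intro p hp
    rw [pvRank_items] at hp
    simp only [List.mem_cons, List.not_mem_nil, or_false] at hp
    simp only [beq_iff_eq]
    rcases hp with h'|h'|h'|h'|h'|h'|h'|h'|h' <;> subst h' <;> intro hk <;>
      exact h (by rw [← hk]; decide)
  simp [pvKey, PySem.Dict.getD, PySem.Dict.get?, hf]
  decide

theorem pvKey_lt_nine_of_mem (k : String) (h : k ∈ pvPriority) : pvKey k < 9 := by
  simp only [pvPriority, List.mem_cons, List.not_mem_nil, or_false] at h
  rcases h with h|h|h|h|h|h|h|h|h <;> subst h <;> decide

theorem pvKey_le_nine (k : String) : pvKey k ≤ 9 := by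
  by_cases hm : k ∈ pvPriority
  · exact le_of_lt (pvKey_lt_nine_of_mem k hm)
  · rw [pvKey_of_not_mem k hm]

theorem pvPriority_pairwise : pvPriority.Pairwise (fun a b => pvKey a < pvKey b) := by
  decide

-- insert at the head when every element compares greater
theorem insertBy_cons_of_head (before : String → String → Bool) (x : String) (ys : List String)
    (h : ∀ y ∈ ys, before x y = true) :
    PySem.List.insertBy before x ys = x :: ys := by
  cases ys with
  | nil => rfl
  | cons y t => simp [PySem.List.insertBy, h y (by simp)]

-- inserting a fresh priority key into (already placed priority keys ++ tail of non-priority keys)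
theorem insertBy_priority (pri : List String) (k : String) (q : String → Bool) (T : List String)
    (hk : k ∈ pri) (hp : pri.Pairwise (fun a b => pvKey a < pvKey b)) (hq : q k = false)
    (hT : ∀ t ∈ T, pvKey k < pvKey t) :
    PySem.List.insertBy (fun a b => decide (pvKey a < pvKey b)) k (pri.filter q ++ T)
      = pri.filter (fun x => q x || x == k) ++ T := by
  induction pri with
  | nil => simp at hk
  | cons p rest ih =>
    rw [List.pairwise_cons] at hp
    obtain ⟨hlt, hp'⟩ := hp
    rcases List.mem_cons.mp hk with hkp | hkr
    · subst hkp
      have hknr : k ∉ rest := fun hm => lt_irrefl _ (hlt k hm)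
      have hfil : (k :: rest).filter q = rest.filter q := by
        simp [hq]
      rw [hfil]
      rw [insertBy_cons_of_head _ _ _ (by
        intro y hy
        rcases List.mem_append.mp hy with h'|h'
        · exact decide_eq_true (hlt y (List.mem_of_mem_filter h'))
        · exact decide_eq_true (hT y h'))]
      have hrest : rest.filter (fun x => q x || x == k) = rest.filter q := by
        apply List.filter_congr
        intro x hx
        have hxk : (x == k) = false := beq_eq_false_iff_ne.mpr (fun e => hknr (e ▸ hx))
        simp [hxk]
      simp [hq, hrest]
    · have hpk : pvKey p < pvKey k := hlt k hkr
      have hpne : p ≠ k := fun e => lt_irrefl _ (e ▸ hpk)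
      have hbe : (decide (pvKey k < pvKey p)) = false := by
        simp; omega
      cases hqp : q p with
      | true =>
        rw [List.filter_cons_of_pos (by simp [hqp]), List.filter_cons_of_pos (by simp [hqp]),
            List.cons_append, List.cons_append]
        rw [show PySem.List.insertBy (fun a b => decide (pvKey a < pvKey b)) k
              (p :: (List.filter q rest ++ T))
            = p :: PySem.List.insertBy (fun a b => decide (pvKey a < pvKey b)) k
              (List.filter q rest ++ T) by simp [PySem.List.insertBy, hbe]]
        rw [ih hkr hp']
      | false =>
        rw [List.filter_cons_of_neg (by simp [hqp]),
            List.filter_cons_of_neg (by simp [hqp]; exact hpne)]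
        exact ih hkr hp'

-- A's second loop over a duplicate-free key list: append the unseen keys
theorem foldA : ∀ (l : List String), l.Nodup → ∀ (s : List String),
    l.foldl (fun acc k => if acc.contains k then acc else acc ++ [k]) s
      = s ++ l.filter (fun k => !s.contains k) := by
  intro l
  induction l with
  | nil => intro _ s; simp
  | cons k t ih =>
    intro hl s
    obtain ⟨hk, ht⟩ := List.nodup_cons.mp hl
    cases hs : s.contains k with
    | true =>
      simp only [List.foldl_cons, hs, if_true]
      rw [ih ht s, List.filter_cons_of_neg (by simp at hs ⊢; exact hs)]
    | false =>
      simp only [List.foldl_cons, hs, Bool.false_eq_true, if_false]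
      rw [ih ht (s ++ [k])]
      have h1 : t.filter (fun x => !(s ++ [k]).contains x) = t.filter (fun x => !s.contains x) := by
        apply List.filter_congr
        intro x hx
        simp
        intro _ e
        exact hk (e ▸ hx)
      rw [h1, List.filter_cons_of_pos (by simp at hs ⊢; exact hs)]
      simp

-- the stable sort by rank, characterised on a duplicate-free key list
theorem sorted_key_eq : ∀ (l : List String), l.Nodup →
    PySem.List.sorted l pvKey false
      = pvPriority.filter (fun k => l.contains k)
        ++ l.filter (fun k => !pvPriority.contains k) := by
  intro l
  induction l using List.reverseRecOn with
  | nil => intro _; simp [PySem.List.sorted]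
  | append_singleton l k ih =>
    intro hl
    obtain ⟨hnl, _, hdisj⟩ := List.nodup_append.mp hl
    have hk : k ∉ l := fun hm => hdisj k hm k (by simp) rfl
    rw [PySem.List.sorted_eq_foldl_insertBy, List.foldl_append, List.foldl_cons, List.foldl_nil,
        ← PySem.List.sorted_eq_foldl_insertBy, ih hnl]
    by_cases hkp : k ∈ pvPriority
    · have hq : l.contains k = false := by
        simp only [Bool.not_eq_true, ← Bool.not_eq_true]
        exact (Bool.not_eq_true _).symm ▸ (by simp [List.contains_iff_mem, hk])
      have hT : ∀ t ∈ l.filter (fun x => !pvPriority.contains x), pvKey k < pvKey t := by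
        intro t htm
        have h1 := List.of_mem_filter htm
        have ht9 : pvKey t = 9 := pvKey_of_not_mem t (by simpa using h1)
        have := pvKey_lt_nine_of_mem k hkp
        omega
      rw [insertBy_priority pvPriority k _ _ hkp pvPriority_pairwise hq hT]
      congr 1
      · apply List.filter_congr
        intro x _
        rw [Bool.eq_iff_iff]
        simp [List.contains_append]
      · rw [List.filter_append]
        simp
        exact hkp
    · have h9 : pvKey k = 9 := pvKey_of_not_mem k hkp
      rw [PySem.List.insertBy_of_forall_not_before _ _ _ (by
        intro y _
        have := pvKey_le_nine y
        simp
        omega)]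
      have hP : pvPriority.filter (fun x => (l ++ [k]).contains x)
          = pvPriority.filter (fun x => l.contains x) := by
        apply List.filter_congr
        intro x hx
        simp
        intro e
        exact absurd (e ▸ hx) hkp
      have hTk : (l ++ [k]).filter (fun x => !pvPriority.contains x)
          = l.filter (fun x => !pvPriority.contains x) ++ [k] := by
        rw [List.filter_append]
        simp
        exact hkp
      rw [hP, hTk, List.append_assoc]

-- ===== VERDICT (by name: the statement is the Claim_ definition above) =====
theorem sort_symbols_by_trend_spec : Claim_equal_sort_symbols_by_trend := by
  intro symbols _
  unfold Spec_sort_symbols_by_trend sort_symbols_by_trend sort_symbols_by_trend_alt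
  simp only []
  have hnd : (PySem.List.dedup (symbols.map Prod.fst)).Nodup := by
    rw [PySem.List.dedup_eq_ofList]
    exact PySem.Set.nodup_ofList _
  rw [PySem.List.foldl_append_if_eq_filter, foldA _ hnd,
      show (fun k => pvRank.getD k (PySem.List.len pvPriority)) = pvKey from rfl,
      sorted_key_eq _ hnd]
  simp only [List.nil_append]
  congr 1
  · apply List.filter_congr
    intro x _
    rw [Bool.eq_iff_iff]
    simp [PySem.List.mem_dedup]
  · apply List.filter_congr
    intro x hx
    have hxk : (symbols.map Prod.fst).contains x = true := by
      rw [List.contains_iff_mem]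
      exact (PySem.List.mem_dedup _ _).mp hx
    by_cases hp : x ∈ pvPriority
    · have e1 : ((pvPriority.filter (fun key => (symbols.map Prod.fst).contains key)).contains x) = true :=
        List.contains_iff_mem.mpr (List.mem_filter.mpr ⟨hp, hxk⟩)
      have e2 : pvPriority.contains x = true := List.contains_iff_mem.mpr hp
      rw [e1, e2]
    · have e1 : ((pvPriority.filter (fun key => (symbols.map Prod.fst).contains key)).contains x) = false := by
        rw [Bool.eq_false_iff]
        intro hc
        exact hp (List.mem_filter.mp (List.contains_iff_mem.mp hc)).1
      have e2 : pvPriority.contains x = false := by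
        rw [Bool.eq_false_iff]
        intro hc
        exact hp (List.contains_iff_mem.mp hc)
      rw [e1, e2]
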